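-- pv_equiv track=rewrite | github.com/yashwanthguguloth24/Algorithms | Greedy/Geek_collects_balls.py | MaxBalls
-- ===== SOURCE A (Python) =====
-- def MaxBalls(r1,r2,n,m):
--     res = 0
--     first = 0
--     second = 0
--     i = 0
--     j = 0
--     while i < n and j < m:
--         if r1[i] < r2[j]:
--             first += r1[i]
--             i += 1
--         elif r2[j] < r1[i]:
--             second += r2[j]
--             j += 1
--         else:
--             res += max(first,second)+r1[i]
--             first = 0
--             second = 0
--             temp = r1[i]
--             i += 1
--             j += 1
--
--             # for duplicates of common element
--             while i < n and r1[i] == temp: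
--                 res += r1[i]
--                 i += 1
--             while j < m and r2[j] == temp:
--                 res += r2[j]
--                 j += 1
--
--
--     while i < n:
--         first += r1[i]
--         i += 1
--
--     while j < m:
--         second += r2[j]
--         j += 1
--
--     res += max(first,second)
--     return res
-- ===== SOURCE B (Python) =====
-- def _rle(xs):
--     # run-length encode: list of (value, count) for maximal equal runs
--     runs = []
--     i = 0
--     while i < len(xs):
--         k = i
--         while k < len(xs) and xs[k] == xs[i]:
--             k += 1
--         runs.append((xs[i], k - i))
--         i = k
--     return runs
--
--
-- def MaxBalls(r1, r2, n, m):
--     # Run-length encode both prefixes, then merge run-by-run: duplicates are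
--     # gone structurally, and each crossover contributes v*(c1+c2-1) in closed form.
--     R1 = _rle(r1[:max(n, 0)])
--     R2 = _rle(r2[:max(m, 0)])
--     res = 0
--     f = s = 0
--     p = q = 0
--     while p < len(R1) and q < len(R2):
--         v1, c1 = R1[p]
--         v2, c2 = R2[q]
--         if v1 < v2:
--             f += v1 * c1
--             p += 1
--         elif v2 < v1:
--             s += v2 * c2
--             q += 1
--         else:
--             res += max(f, s) + v1 * (c1 + c2 - 1)
--             f = s = 0
--             p += 1
--             q += 1
--     f += sum(v * c for v, c in R1[p:])
--     s += sum(v * c for v, c in R2[q:])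
--     return res + max(f, s)
-- ===== Notes on version B (the rewrite author's own statement) =====
-- stated objective: alternative
-- what changed: B changes the data representation: it run-length encodes each prefix once into (value,count) run lists and merges runs instead of elements, so A's running per-element accumulators and both inner duplicate loops disappear, each crossover contributing v*(c1+c2-1) in closed form.
import Mathlib
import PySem

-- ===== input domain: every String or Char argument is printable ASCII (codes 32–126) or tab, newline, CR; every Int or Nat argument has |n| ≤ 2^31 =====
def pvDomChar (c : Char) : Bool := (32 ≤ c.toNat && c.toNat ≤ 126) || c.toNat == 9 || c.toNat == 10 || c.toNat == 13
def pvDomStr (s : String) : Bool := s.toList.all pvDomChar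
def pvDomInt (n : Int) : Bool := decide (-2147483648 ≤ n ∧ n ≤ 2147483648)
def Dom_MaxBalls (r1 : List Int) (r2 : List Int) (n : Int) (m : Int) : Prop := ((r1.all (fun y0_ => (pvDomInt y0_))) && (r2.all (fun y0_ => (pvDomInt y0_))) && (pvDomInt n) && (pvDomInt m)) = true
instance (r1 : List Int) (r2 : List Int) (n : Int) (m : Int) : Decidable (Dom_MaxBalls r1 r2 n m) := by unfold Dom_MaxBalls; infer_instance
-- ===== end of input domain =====

-- B replaces A's element-wise merge with per-element duplicate loops by a different data
-- representation: it run-length encodes both prefixes once and merges the run lists, each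
-- crossover contributing v*(c1+c2-1) in closed form (objective: alternative, same O(n+m)).
-- A's loops are ported with an ample structural fuel parameter (pure totalisation, no
-- algorithm change); each call site passes fuel at least the loop's iteration count.

-- ===== PORT A =====
-- inner duplicate loop 'while i < bound and xs[i] == temp: res += xs[i]; i += 1'
def dupA (xs : List Int) (bound temp : Int) : Nat → Int → Int → Int × Int
  | 0, res, i => (res, i)
  | fuel + 1, res, i =>
    if i < bound ∧ PySem.List.pyGetD xs i 0 = temp then
      dupA xs bound temp fuel (res + PySem.List.pyGetD xs i 0) (i + 1)
    else (res, i)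

-- tail loop 'while i < bound: acc += xs[i]; i += 1'
def tailA (xs : List Int) (bound : Int) : Nat → Int → Int → Int
  | 0, acc, _ => acc
  | fuel + 1, acc, i =>
    if i < bound then tailA xs bound fuel (acc + PySem.List.pyGetD xs i 0) (i + 1) else acc

-- A's main merge loop, with its res/first/second state
def loopA (r1 r2 : List Int) (n m : Int) : Nat → Int → Int → Int → Int → Int → Int
  | 0, res, first, second, i, j =>
    res + max (tailA r1 n (n - i).toNat first i) (tailA r2 m (m - j).toNat second j)
  | fuel + 1, res, first, second, i, j =>
    if i < n ∧ j < m then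
      if PySem.List.pyGetD r1 i 0 < PySem.List.pyGetD r2 j 0 then
        loopA r1 r2 n m fuel res (first + PySem.List.pyGetD r1 i 0) second (i + 1) j
      else if PySem.List.pyGetD r2 j 0 < PySem.List.pyGetD r1 i 0 then
        loopA r1 r2 n m fuel res first (second + PySem.List.pyGetD r2 j 0) i (j + 1)
      else
        match dupA r1 n (PySem.List.pyGetD r1 i 0) (n - (i + 1)).toNat
                (res + max first second + PySem.List.pyGetD r1 i 0) (i + 1) with
        | (res2, i2) =>
          match dupA r2 m (PySem.List.pyGetD r1 i 0) (m - (j + 1)).toNat res2 (j + 1) with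
          | (res3, j2) => loopA r1 r2 n m fuel res3 0 0 i2 j2
    else
      res + max (tailA r1 n (n - i).toNat first i) (tailA r2 m (m - j).toNat second j)

def MaxBalls (r1 : List Int) (r2 : List Int) (n : Int) (m : Int) : Int :=
  loopA r1 r2 n m (n.toNat + m.toNat) 0 0 0 0 0

-- ===== PORT B =====
-- Source B's _rle: scan to the end of the current maximal run, emit (value, run length), continue
def rleB : List Int → List (Int × Int)
  | [] => []
  | x :: xs =>
      (x, 1 + (xs.takeWhile (fun z => z == x)).length) :: rleB (xs.dropWhile (fun z => z == x))
termination_by l => l.length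
decreasing_by
  have := List.length_dropWhile_le (fun z => z == x) xs
  simp only [List.length_cons]
  omega

-- 'sum(v * c for v, c in R)'
def sumRuns (R : List (Int × Int)) : Int := (R.map (fun vc => vc.1 * vc.2)).sum

-- Source B's merge over the two run lists (res accumulated through the recursion)
def mergeRB : List (Int × Int) → List (Int × Int) → Int → Int → Int
  | [], R2, f, s => max f (s + sumRuns R2)
  | R1, [], f, s => max (f + sumRuns R1) s
  | (v1, c1) :: R1, (v2, c2) :: R2, f, s =>
    if v1 < v2 then mergeRB R1 ((v2, c2) :: R2) (f + v1 * c1) s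
    else if v2 < v1 then mergeRB ((v1, c1) :: R1) R2 f (s + v2 * c2)
    else max f s + v1 * (c1 + c2 - 1) + mergeRB R1 R2 0 0
termination_by R1 R2 => R1.length + R2.length

def MaxBalls_alt (r1 : List Int) (r2 : List Int) (n : Int) (m : Int) : Int :=
  mergeRB (rleB (PySem.List.slice r1 none (some (max n 0))))
          (rleB (PySem.List.slice r2 none (some (max m 0)))) 0 0

-- ===== PRECONDITION & SPEC =====
-- Pre_ excludes exactly the inputs where Python A raises IndexError (a loop bound past the end).
def Pre_MaxBalls (r1 : List Int) (r2 : List Int) (n : Int) (m : Int) : Prop :=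
  n ≤ (r1.length : Int) ∧ m ≤ (r2.length : Int)
instance (r1 : List Int) (r2 : List Int) (n : Int) (m : Int) : Decidable (Pre_MaxBalls r1 r2 n m) := by unfold Pre_MaxBalls; infer_instance

def pvWitness_MaxBalls : List Int × List Int × Int × Int := ([1, 2, 2, 5], [0, 2, 5], 4, 3)

def Spec_MaxBalls (r1 : List Int) (r2 : List Int) (n : Int) (m : Int) (out : Int) : Prop := out = MaxBalls_alt r1 r2 n m
instance (r1 : List Int) (r2 : List Int) (n : Int) (m : Int) (out : Int) : Decidable (Spec_MaxBalls r1 r2 n m out) := by unfold Spec_MaxBalls; infer_instance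

-- ===== CLAIM (what is proved, stated in full; the proofs are below) =====
def Claim_equal_MaxBalls : Prop := ∀ (r1 : List Int) (r2 : List Int) (n : Int) (m : Int), Dom_MaxBalls r1 r2 n m → Pre_MaxBalls r1 r2 n m → Spec_MaxBalls r1 r2 n m (MaxBalls r1 r2 n m)

-- ===== LEMMAS AND PROOFS =====

-- proof-side bridge: A's element-wise merge expressed on list suffixes
def mergeE : List Int → List Int → Int → Int → Int
  | [], ys, f, s => max f (s + ys.sum)
  | xs, [], f, s => max (f + xs.sum) s
  | x :: xs, y :: ys, f, s =>
    if x < y then mergeE xs (y :: ys) (f + x) s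
    else if y < x then mergeE (x :: xs) ys f (s + y)
    else max f s
         + x * (1 + (xs.takeWhile (fun z => z == x)).length + (ys.takeWhile (fun z => z == x)).length)
         + mergeE (xs.dropWhile (fun z => z == x)) (ys.dropWhile (fun z => z == x)) 0 0
termination_by xs ys => xs.length + ys.length
decreasing_by
  · simp only [List.length_cons]; omega
  · simp only [List.length_cons]; omega
  · have h1 := List.length_dropWhile_le (fun z => z == x) xs
    have h2 := List.length_dropWhile_le (fun z => z == x) ys
    simp only [List.length_cons]; omega

theorem dropWhile_eq_drop_tw {p : Int → Bool} : ∀ (l : List Int),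
    l.dropWhile p = l.drop (l.takeWhile p).length := by
  intro l
  induction l with
  | nil => rfl
  | cons a l ih =>
    by_cases h : p a
    · simp [List.dropWhile_cons, List.takeWhile_cons, h, ih]
    · simp [List.dropWhile_cons, List.takeWhile_cons, h]

theorem sum_takeWhile_eq (c : Int) : ∀ (l : List Int),
    (l.takeWhile (fun z => z == c)).sum = c * (l.takeWhile (fun z => z == c)).length := by
  intro l
  induction l with
  | nil => simp
  | cons a l ih =>
    by_cases h : a = c
    · simp [List.takeWhile_cons, h, ih]; ring
    · simp [List.takeWhile_cons, h]

theorem pyGetD_nonneg_toNat (xs : List Int) (i : Int) (d : Int) (h : 0 ≤ i) :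
    PySem.List.pyGetD xs i d = xs.getD i.toNat d := by
  have := PySem.List.pyGetD_natCast (xs := xs) (n := i.toNat) (d := d)
  rwa [Int.toNat_of_nonneg h] at this

theorem slice_stop_nil (xs : List Int) (i b : Int) (h0 : 0 ≤ b) (h1 : b ≤ i) :
    PySem.List.slice xs (some i) (some b) = [] := by
  rw [PySem.List.slice_toNat _ (by omega) h0, show b.toNat - i.toNat = 0 by omega]
  simp

theorem slice_cons (xs : List Int) (i b : Int) (h0 : 0 ≤ i) (hib : i < b)
    (hl : i.toNat < xs.length) :
    PySem.List.slice xs (some i) (some b)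
      = xs.getD i.toNat 0 :: PySem.List.slice xs (some (i + 1)) (some b) := by
  have h0' : (0 : Int) ≤ b := by omega
  rw [PySem.List.slice_toNat _ h0 h0', PySem.List.slice_toNat _ (by omega) h0']
  rw [show (i + 1).toNat = i.toNat + 1 by omega,
      show b.toNat - i.toNat = (b.toNat - (i.toNat + 1)) + 1 by omega,
      List.drop_eq_getElem_cons hl, List.take_succ_cons,
      List.getD_eq_getElem?_getD, List.getElem?_eq_getElem hl]
  simp

theorem slice_drop (xs : List Int) (i b : Int) (t : Nat) (h0 : 0 ≤ i) (hb : 0 ≤ b) :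
    (PySem.List.slice xs (some i) (some b)).drop t
      = PySem.List.slice xs (some (i + t)) (some b) := by
  rw [PySem.List.slice_toNat _ h0 hb, PySem.List.slice_toNat _ (by omega) hb]
  rw [List.drop_take, List.drop_drop]
  rw [show (i + (t : Int)).toNat = i.toNat + t by omega,
      show i.toNat + t = t + i.toNat by omega]
  congr 1
  omega

theorem sum_slice_succ (xs : List Int) (i i' : Int) (h0 : 0 ≤ i) (h1 : i < i') :
    (PySem.List.slice xs (some i) (some i')).sum
      = PySem.List.pyGetD xs i 0 + (PySem.List.slice xs (some (i + 1)) (some i')).sum := by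
  have h0' : (0 : Int) ≤ i' := by omega
  rw [PySem.List.slice_toNat _ h0 h0', PySem.List.slice_toNat _ (by omega) h0']
  rw [pyGetD_nonneg_toNat _ _ _ h0]
  by_cases hl : i.toNat < xs.length
  · rw [show (i + 1).toNat = i.toNat + 1 by omega,
        show i'.toNat - i.toNat = (i'.toNat - (i.toNat + 1)) + 1 by omega,
        List.drop_eq_getElem_cons hl, List.take_succ_cons, List.sum_cons,
        List.getD_eq_getElem?_getD, List.getElem?_eq_getElem hl]
    simp
  · rw [List.drop_of_length_le (by omega), List.drop_of_length_le (by omega),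
        List.getD_eq_getElem?_getD, List.getElem?_eq_none (show xs.length ≤ i.toNat by omega)]
    simp

theorem sum_slice_stop (xs : List Int) (i b : Int) (h0 : 0 ≤ b) (h1 : b ≤ i) :
    (PySem.List.slice xs (some i) (some b)).sum = 0 := by
  rw [slice_stop_nil xs i b h0 h1]
  rfl

theorem tailA_sum (xs : List Int) (bound : Int) (hb : 0 ≤ bound) : ∀ (fuel : Nat) (acc i : Int),
    0 ≤ i → (bound - i).toNat ≤ fuel →
    tailA xs bound fuel acc i = acc + (PySem.List.slice xs (some i) (some bound)).sum := by
  intro fuel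
  induction fuel with
  | zero =>
    intro acc i hi hk
    rw [tailA, sum_slice_stop xs i bound hb (by omega)]
    ring
  | succ fuel ih =>
    intro acc i hi hk
    rw [tailA]
    split_ifs with h
    · rw [ih _ (i + 1) (by omega) (by omega), sum_slice_succ xs i bound hi h]
      ring
    · rw [sum_slice_stop xs i bound hb (by omega)]
      ring

-- dupA consumes exactly the initial run of `c` in the remaining slice
theorem dupA_spec (xs : List Int) (bound c : Int) (hbl : bound ≤ (xs.length : Int))
    (hb : 0 ≤ bound) :
    ∀ (fuel : Nat) (res k : Int), 0 ≤ k → (bound - k).toNat ≤ fuel →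
    dupA xs bound c fuel res k
      = (res + c * ((PySem.List.slice xs (some k) (some bound)).takeWhile (fun z => z == c)).length,
         k + ((PySem.List.slice xs (some k) (some bound)).takeWhile (fun z => z == c)).length) := by
  intro fuel
  induction fuel with
  | zero =>
    intro res k hk hf
    rw [dupA, slice_stop_nil xs k bound hb (by omega)]
    simp
  | succ fuel ih =>
    intro res k hk hf
    rw [dupA]
    split_ifs with h
    · obtain ⟨hkb, hv⟩ := h
      have hkl : k.toNat < xs.length := by omega
      have hcons := slice_cons xs k bound hk hkb hkl
      have hhead : xs.getD k.toNat 0 = c := by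
        rw [← pyGetD_nonneg_toNat xs k 0 hk]; exact hv
      rw [ih _ (k + 1) (by omega) (by omega), hcons, hhead]
      simp only [List.takeWhile_cons, beq_self_eq_true, if_true, List.length_cons]
      rw [hv, Prod.mk.injEq]
      constructor
      · push_cast; ring
      · push_cast; ring
    · by_cases hkb : k < bound
      · -- head exists but differs from c
        have hkl : k.toNat < xs.length := by omega
        have hne : ¬ xs.getD k.toNat 0 = c := by
          rw [← pyGetD_nonneg_toNat xs k 0 hk]
          intro hc; exact h ⟨hkb, hc⟩
        rw [slice_cons xs k bound hk hkb hkl]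
        simp only [List.takeWhile_cons, show (xs.getD k.toNat 0 == c) = false by simpa using hne]
        simp
      · rw [slice_stop_nil xs k bound hb (by omega)]
        simp

-- Stage 1: A's merge loop equals the element-wise suffix merge mergeE
theorem loopA_mergeE (r1 r2 : List Int) (n m : Int) (hn : 0 ≤ n) (hm : 0 ≤ m)
    (hln : n ≤ (r1.length : Int)) (hlm : m ≤ (r2.length : Int)) :
    ∀ (fuel : Nat) (res f s i j : Int), 0 ≤ i → 0 ≤ j →
    (n - i).toNat + (m - j).toNat ≤ fuel →
    loopA r1 r2 n m fuel res f s i j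
      = res + mergeE (PySem.List.slice r1 (some i) (some n)) (PySem.List.slice r2 (some j) (some m)) f s := by
  intro fuel
  induction fuel with
  | zero =>
    intro res f s i j hi hj hk
    rw [loopA, slice_stop_nil r1 i n hn (by omega), slice_stop_nil r2 j m hm (by omega)]
    rw [show (n - i).toNat = 0 by omega, show (m - j).toNat = 0 by omega]
    rw [tailA, tailA, mergeE]
    simp
  | succ fuel ih =>
    intro res f s i j hi hj hk
    have hg1 : PySem.List.pyGetD r1 i 0 = r1.getD i.toNat 0 := pyGetD_nonneg_toNat r1 i 0 hi
    have hg2 : PySem.List.pyGetD r2 j 0 = r2.getD j.toNat 0 := pyGetD_nonneg_toNat r2 j 0 hj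
    rw [loopA]
    split_ifs with h h1 h2
    · -- r1[i] < r2[j]
      obtain ⟨hin, hjm⟩ := h
      have hcons1 := slice_cons r1 i n hi hin (by omega)
      have hcons2 := slice_cons r2 j m hj hjm (by omega)
      rw [ih res (f + PySem.List.pyGetD r1 i 0) s (i + 1) j (by omega) hj (by omega)]
      rw [hcons1, hcons2, mergeE]
      simp only [hg1, hg2] at h1 ⊢
      rw [if_pos h1]
    · -- r2[j] < r1[i]
      obtain ⟨hin, hjm⟩ := h
      have hcons1 := slice_cons r1 i n hi hin (by omega)
      have hcons2 := slice_cons r2 j m hj hjm (by omega)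
      rw [ih res f (s + PySem.List.pyGetD r2 j 0) i (j + 1) hi (by omega) (by omega)]
      rw [hcons1, hcons2, mergeE]
      simp only [hg1, hg2] at h1 h2 ⊢
      rw [if_neg h1, if_pos h2]
    · -- equal heads: crossover block
      obtain ⟨hin, hjm⟩ := h
      have hcons1 := slice_cons r1 i n hi hin (by omega)
      have hcons2 := slice_cons r2 j m hj hjm (by omega)
      rw [dupA_spec r1 n (PySem.List.pyGetD r1 i 0) hln (by omega) _ _ (i + 1) (by omega) (by omega)]
      dsimp only
      rw [dupA_spec r2 m (PySem.List.pyGetD r1 i 0) hlm (by omega) _ _ (j + 1) (by omega) (by omega)]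
      dsimp only
      rw [ih _ 0 0
            (i + 1 + ((PySem.List.slice r1 (some (i + 1)) (some n)).takeWhile (fun z => z == PySem.List.pyGetD r1 i 0)).length)
            (j + 1 + ((PySem.List.slice r2 (some (j + 1)) (some m)).takeWhile (fun z => z == PySem.List.pyGetD r1 i 0)).length)
            (by omega) (by omega) (by omega)]
      rw [hcons1, hcons2, mergeE]
      simp only [hg1, hg2] at h1 h2 ⊢
      rw [if_neg h1, if_neg h2]
      rw [dropWhile_eq_drop_tw, dropWhile_eq_drop_tw]
      rw [slice_drop r1 (i + 1) n _ (by omega) hn, slice_drop r2 (j + 1) m _ (by omega) hm]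
      ring
    · -- loop condition exhausted
      rw [tailA_sum r1 n hn _ f i hi le_rfl, tailA_sum r2 m hm _ s j hj le_rfl]
      by_cases hin : i < n
      · have hjm : ¬ j < m := fun hc => h ⟨hin, hc⟩
        have hcons1 := slice_cons r1 i n hi hin (by omega)
        rw [slice_stop_nil r2 j m hm (by omega), hcons1, mergeE, ← hcons1]
        all_goals simp
      · rw [slice_stop_nil r1 i n hn (by omega), mergeE]
        simp

-- sum of a run-length encoding
theorem rleB_nil : rleB ([] : List Int) = [] := by rw [rleB]

theorem sumRuns_rleB : ∀ (k : Nat) (l : List Int), l.length ≤ k → sumRuns (rleB l) = l.sum := by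
  intro k
  induction k with
  | zero =>
    intro l hl
    have : l = [] := List.length_eq_zero_iff.mp (by omega)
    subst this
    rw [rleB_nil]
    simp [sumRuns]
  | succ k ih =>
    intro l hl
    match l with
    | [] => rw [rleB_nil]; simp [sumRuns]
    | x :: xs =>
      rw [rleB]
      have hd := List.length_dropWhile_le (fun z => z == x) xs
      rw [show sumRuns ((x, 1 + ((xs.takeWhile fun z => z == x)).length) :: rleB (xs.dropWhile fun z => z == x))
            = x * (1 + ((xs.takeWhile fun z => z == x)).length) + sumRuns (rleB (xs.dropWhile fun z => z == x)) by
        simp [sumRuns]]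
      rw [ih _ (by simp at hl; omega)]
      have hsplit : xs = (xs.takeWhile fun z => z == x) ++ (xs.dropWhile fun z => z == x) :=
        (List.takeWhile_append_dropWhile).symm
      conv_rhs => rw [List.sum_cons, hsplit]
      rw [List.sum_append, sum_takeWhile_eq x xs]
      ring

theorem mergeRB_nil_right : ∀ (R1 : List (Int × Int)) (f s : Int),
    mergeRB R1 [] f s = max (f + sumRuns R1) s := by
  intro R1 f s
  match R1 with
  | [] => rw [mergeRB]; simp [sumRuns]
  | (v, c) :: R1 =>
    rw [mergeRB]
    simp

-- mergeE consumes a whole left run when its value is below the right head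
theorem mergeE_run_left (x y : Int) (hxy : x < y) : ∀ (xs ys : List Int) (f s : Int),
    mergeE (x :: xs) (y :: ys) f s
      = mergeE (xs.dropWhile (fun z => z == x)) (y :: ys)
          (f + x * (1 + (xs.takeWhile (fun z => z == x)).length)) s := by
  intro xs
  induction xs with
  | nil =>
    intro ys f s
    rw [mergeE, if_pos hxy]
    simp
  | cons z xs ih =>
    intro ys f s
    by_cases hz : z = x
    · subst hz
      rw [mergeE, if_pos hxy, ih ys (f + z) s]
      rw [List.takeWhile_cons, List.dropWhile_cons]
      simp only [BEq.rfl, if_true, List.length_cons]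
      congr 1
      push_cast
      ring
    · rw [mergeE, if_pos hxy]
      rw [List.takeWhile_cons, List.dropWhile_cons,
          show (z == x) = false by simpa using hz]
      simp

theorem mergeE_run_right (x y : Int) (hxy : y < x) : ∀ (ys xs : List Int) (f s : Int),
    mergeE (x :: xs) (y :: ys) f s
      = mergeE (x :: xs) (ys.dropWhile (fun z => z == y))
          f (s + y * (1 + (ys.takeWhile (fun z => z == y)).length)) := by
  intro ys
  induction ys with
  | nil =>
    intro xs f s
    rw [mergeE, if_neg (by omega), if_pos hxy]
    simp
  | cons z ys ih =>
    intro xs f s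
    by_cases hz : z = y
    · subst hz
      rw [mergeE, if_neg (by omega), if_pos hxy, ih xs f (s + z)]
      rw [List.takeWhile_cons, List.dropWhile_cons]
      simp only [BEq.rfl, if_true, List.length_cons]
      congr 1
      push_cast
      ring
    · rw [mergeE, if_neg (by omega), if_pos hxy]
      rw [List.takeWhile_cons, List.dropWhile_cons,
          show (z == y) = false by simpa using hz]
      simp

-- Stage 2: the element-wise merge equals B's merge of the run-length encodings
theorem mergeE_rle : ∀ (k : Nat) (xs ys : List Int), xs.length + ys.length ≤ k →
    ∀ (f s : Int), mergeE xs ys f s = mergeRB (rleB xs) (rleB ys) f s := by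
  intro k
  induction k with
  | zero =>
    intro xs ys hl f s
    have hx : xs = [] := List.length_eq_zero_iff.mp (by omega)
    have hy : ys = [] := List.length_eq_zero_iff.mp (by omega)
    subst hx; subst hy
    rw [mergeE, rleB_nil, mergeRB]
    simp [sumRuns]
  | succ k ih =>
    intro xs ys hl f s
    match xs, ys with
    | [], ys =>
      rw [mergeE, rleB_nil, mergeRB, sumRuns_rleB ys.length ys le_rfl]
    | x :: xs, [] =>
      rw [mergeE, rleB_nil, mergeRB_nil_right, sumRuns_rleB (x :: xs).length _ le_rfl]
      all_goals simp
    | x :: xs, y :: ys =>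
      have hdx := List.length_dropWhile_le (fun z => z == x) xs
      have hdy := List.length_dropWhile_le (fun z => z == x) ys
      have hdy2 := List.length_dropWhile_le (fun z => z == y) ys
      simp only [List.length_cons] at hl
      rw [rleB, rleB, mergeRB]
      rcases lt_trichotomy x y with hlt | heq | hgt
      · rw [if_pos hlt, mergeE_run_left x y hlt xs ys f s, ← rleB]
        exact ih _ (y :: ys) (by simp; omega) _ s
      · subst heq
        rw [if_neg (by omega), if_neg (by omega)]
        rw [mergeE, if_neg (by omega), if_neg (by omega)]
        rw [ih (xs.dropWhile (fun z => z == x)) (ys.dropWhile (fun z => z == x)) (by omega) 0 0]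
        ring_nf
      · rw [if_neg (by omega), if_pos hgt, mergeE_run_right x y hgt ys xs f s, ← rleB]
        exact ih (x :: xs) _ (by simp; omega) f _

theorem slice_zero_nil (xs : List Int) : PySem.List.slice xs none (some 0) = [] := by
  rw [← PySem.List.slice_zero_start, PySem.List.slice_toNat _ le_rfl le_rfl]
  simp

-- B's program equals the element-wise suffix merge on the two prefixes
theorem alt_eq_mergeE (r1 r2 : List Int) (n m : Int) (hn : 0 ≤ n) (hm : 0 ≤ m) :
    MaxBalls_alt r1 r2 n m
      = mergeE (PySem.List.slice r1 (some 0) (some n)) (PySem.List.slice r2 (some 0) (some m)) 0 0 := by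
  unfold MaxBalls_alt
  rw [max_eq_left hn, max_eq_left hm]
  rw [mergeE_rle ((PySem.List.slice r1 (some 0) (some n)).length
        + (PySem.List.slice r2 (some 0) (some m)).length) _ _ le_rfl 0 0]
  rw [PySem.List.slice_zero_start, PySem.List.slice_zero_start]

-- ===== VERDICT (by name: the statement is the Claim_ definition above) =====
theorem MaxBalls_spec : Claim_equal_MaxBalls := by
  intro r1 r2 n m _ hpre
  obtain ⟨hln, hlm⟩ := hpre
  unfold Spec_MaxBalls MaxBalls
  by_cases hn : 0 ≤ n <;> by_cases hm : 0 ≤ m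
  · -- main case
    rw [loopA_mergeE r1 r2 n m hn hm hln hlm (n.toNat + m.toNat) 0 0 0 0 0 le_rfl le_rfl (by omega),
        alt_eq_mergeE r1 r2 n m hn hm]
    simp
  · -- n ≥ 0, m < 0: both sides are max (sum r1[:n]) 0
    have hA : ∀ (fuel : Nat),
        0 + max (tailA r1 n (n - 0).toNat 0 0) (tailA r2 m (m - 0).toNat 0 0)
          = max (0 + (PySem.List.slice r1 (some 0) (some n)).sum) 0 := by
      intro fuel
      rw [tailA_sum r1 n hn _ 0 0 le_rfl le_rfl,
          show ((m : Int) - 0).toNat = 0 by omega, tailA]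
      simp
    have hB : MaxBalls_alt r1 r2 n m = max (0 + (PySem.List.slice r1 none (some n)).sum) 0 := by
      unfold MaxBalls_alt
      rw [max_eq_left hn, max_eq_right (show m ≤ 0 by omega)]
      rw [slice_zero_nil, rleB_nil, mergeRB_nil_right,
          sumRuns_rleB (PySem.List.slice r1 none (some n)).length _ le_rfl]
    rw [hB, ← PySem.List.slice_zero_start]
    cases hf : n.toNat + m.toNat with
    | zero => rw [loopA]; exact hA 0
    | succ k => rw [loopA, if_neg (by omega : ¬ ((0 : Int) < n ∧ (0 : Int) < m))]; exact hA (k + 1)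
  · -- n < 0, m ≥ 0: both sides are max 0 (sum r2[:m])
    have hA : 0 + max (tailA r1 n (n - 0).toNat 0 0) (tailA r2 m (m - 0).toNat 0 0)
          = max 0 (0 + (PySem.List.slice r2 (some 0) (some m)).sum) := by
      rw [tailA_sum r2 m hm _ 0 0 le_rfl le_rfl,
          show ((n : Int) - 0).toNat = 0 by omega, tailA]
      simp
    have hB : MaxBalls_alt r1 r2 n m = max 0 (0 + (PySem.List.slice r2 none (some m)).sum) := by
      unfold MaxBalls_alt
      rw [max_eq_right (show n ≤ 0 by omega), max_eq_left hm]
      rw [slice_zero_nil, rleB_nil, mergeRB,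
          sumRuns_rleB (PySem.List.slice r2 none (some m)).length _ le_rfl]
    rw [hB, ← PySem.List.slice_zero_start]
    cases hf : n.toNat + m.toNat with
    | zero => rw [loopA]; exact hA
    | succ k => rw [loopA, if_neg (by omega : ¬ ((0 : Int) < n ∧ (0 : Int) < m))]; exact hA
  · -- both negative: both sides are 0
    have hB : MaxBalls_alt r1 r2 n m = 0 := by
      unfold MaxBalls_alt
      rw [max_eq_right (show n ≤ 0 by omega), max_eq_right (show m ≤ 0 by omega)]
      rw [slice_zero_nil, slice_zero_nil, rleB_nil, mergeRB]
      simp [sumRuns]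
    rw [hB, show n.toNat + m.toNat = 0 by omega, loopA,
        show ((n : Int) - 0).toNat = 0 by omega, show ((m : Int) - 0).toNat = 0 by omega,
        tailA, tailA]
    simp
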